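-- pv_equiv track=rewrite | github.com/Dibrary/Algorithm_playground | Programmers/모의고사.py | solution
-- ===== SOURCE A (Python) =====
-- def calculate(answer, student):
--     cnt = 0
--     for i in range(0, len(answer),len(student)):
--         tmp = answer[i:i+len(student)]
--         for idx, i in enumerate(tmp):
--             if student[idx] == i:
--                 cnt += 1
--     return cnt
--
-- def solution(answer):
--
--     first = [1,2,3,4,5]
--     second = [2,1,2,3,2,4,2,5]
--     third = [3,3,1,1,2,2,4,4,5,5]
--
--     collect_values = []
--     collect_values.append(calculate(answer,first))
--     collect_values.append(calculate(answer,second))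
--     collect_values.append(calculate(answer,third))
--
--     answer = []
--     max_value = max(collect_values)
--     for idx, i in enumerate(collect_values):
--         if i == max_value:
--             answer.append((idx+1))
--
--     answer.sort()
--     return answer
-- ===== SOURCE B (Python) =====
-- def solution(answer):
--     first = [1, 2, 3, 4, 5]
--     second = [2, 1, 2, 3, 2, 4, 2, 5]
--     third = [3, 3, 1, 1, 2, 2, 4, 4, 5, 5]
--     s1 = s2 = s3 = 0
--     for i, a in enumerate(answer):
--         if a == first[i % 5]:
--             s1 += 1
--         if a == second[i % 8]:
--             s2 += 1
--         if a == third[i % 10]: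
--             s3 += 1
--     m = max(s1, s2, s3)
--     return [idx for idx, s in enumerate((s1, s2, s3), 1) if s == m]
-- ===== Notes on version B (the rewrite author's own statement) =====
-- stated objective: simpler
-- what changed: Replaced the chunking helper (slice answer into len(student)-sized blocks and scan each block, once per pattern) by a single flat pass over the answer keeping three counters with modular indexing into the fixed patterns, and the append-then-sort selection by an already-ordered comprehension.
import Mathlib
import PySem

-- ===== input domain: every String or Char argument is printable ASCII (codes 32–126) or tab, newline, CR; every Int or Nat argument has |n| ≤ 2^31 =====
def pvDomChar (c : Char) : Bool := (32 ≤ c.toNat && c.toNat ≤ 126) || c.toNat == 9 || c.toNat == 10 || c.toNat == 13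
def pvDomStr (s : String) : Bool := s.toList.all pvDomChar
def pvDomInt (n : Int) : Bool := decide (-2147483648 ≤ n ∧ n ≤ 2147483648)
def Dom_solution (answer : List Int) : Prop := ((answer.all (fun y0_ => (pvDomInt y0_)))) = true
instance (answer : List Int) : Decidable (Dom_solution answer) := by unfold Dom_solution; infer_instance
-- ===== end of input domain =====

-- B replaces A's slice-a-block-per-pattern helper by one flat pass keeping three counters with
-- modular indexing, and the append-then-sort selection by an already-ordered comprehension
-- (objective: simpler; one pass, no per-chunk slice allocations).

-- ===== PORT A =====
-- Python `student[idx]`: idx is always in range here (tmp is a slice of length ≤ len(student)),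
-- so pyGetD with default 0 is exact.
def calculateA (answer student : List Int) : Int :=
  (PySem.List.pyRange 0 answer.length student.length).foldl (fun cnt i =>
    let tmp := PySem.List.slice answer (some i) (some (i + student.length))
    (PySem.List.enumerate tmp).foldl (fun cnt p =>
      if PySem.List.pyGetD student p.1 0 == p.2 then cnt + 1 else cnt) cnt) 0

def solution (answer : List Int) : List Int :=
  let first : List Int := [1, 2, 3, 4, 5]
  let second : List Int := [2, 1, 2, 3, 2, 4, 2, 5]
  let third : List Int := [3, 3, 1, 1, 2, 2, 4, 4, 5, 5]
  let collectValues : List Int :=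
    [calculateA answer first, calculateA answer second, calculateA answer third]
  -- max(collect_values): the list has 3 elements, so max? never returns none
  match PySem.List.max? collectValues id with
  | none => []
  | some maxValue =>
    let res := (PySem.List.enumerate collectValues).foldl
      (fun acc p => if p.2 == maxValue then acc ++ [p.1 + 1] else acc) []
    PySem.List.sorted res id

-- ===== PORT B =====
-- Python `first[i % 5]` etc.: the index is always in range, so pyGetD with default 0 is exact;
-- Python `%` is PySem.Int.mod.
def solution_alt (answer : List Int) : List Int :=
  let first : List Int := [1, 2, 3, 4, 5]
  let second : List Int := [2, 1, 2, 3, 2, 4, 2, 5]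
  let third : List Int := [3, 3, 1, 1, 2, 2, 4, 4, 5, 5]
  let s := (PySem.List.enumerate answer).foldl
    (fun (s : Int × Int × Int) p =>
      (if PySem.List.pyGetD first (PySem.Int.mod p.1 5) 0 == p.2 then s.1 + 1 else s.1,
       if PySem.List.pyGetD second (PySem.Int.mod p.1 8) 0 == p.2 then s.2.1 + 1 else s.2.1,
       if PySem.List.pyGetD third (PySem.Int.mod p.1 10) 0 == p.2 then s.2.2 + 1 else s.2.2))
    (0, 0, 0)
  let m := max s.1 (max s.2.1 s.2.2)
  (PySem.List.enumerate [s.1, s.2.1, s.2.2] 1).filterMap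
    (fun p => if p.2 == m then some p.1 else none)

-- ===== PRECONDITION & SPEC =====
def Spec_solution (answer : List Int) (out : List Int) : Prop := out = solution_alt answer
instance (answer : List Int) (out : List Int) : Decidable (Spec_solution answer out) := by unfold Spec_solution; infer_instance

-- ===== CLAIM (what is proved, stated in full; the proofs are below) =====
def Claim_equal_solution : Prop := ∀ (answer : List Int), Dom_solution answer → Spec_solution answer (solution answer)

-- ===== LEMMAS AND PROOFS =====

-- A's inner-loop predicate: the answer entry matches the pattern entry at the local chunk index
def predA (student : List Int) (p : Int × Int) : Bool :=
  PySem.List.pyGetD student p.1 0 == p.2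

-- B's per-position predicate: the answer entry matches the pattern entry at index i mod len
def modPred (student : List Int) (p : Int × Int) : Bool :=
  PySem.List.pyGetD student (PySem.Int.mod p.1 (student.length : Int)) 0 == p.2

-- B's per-pattern score, as a countP over the enumerated answer
def modScore (student answer : List Int) : Int :=
  ((PySem.List.enumerate answer).countP (modPred student) : Int)

-- A's count over the j-th chunk of the answer
def chunkCnt (student answer : List Int) (j : Nat) : Int :=
  ((PySem.List.enumerate (List.take student.length
      (List.drop (student.length * j) answer))).countP (predA student) : Int)

lemma mem_enumerate_bounds {α : Type} (xs : List α) (s : Int) (p : Int × α)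
    (hp : p ∈ PySem.List.enumerate xs s) : s ≤ p.1 ∧ p.1 < s + xs.length := by
  induction xs generalizing s with
  | nil => simp [PySem.List.enumerate_nil] at hp
  | cons x xs ih =>
    rw [PySem.List.enumerate_cons, List.mem_cons] at hp
    rcases hp with h | h
    · subst h; simp
    · have := ih (s + 1) h
      simp only [List.length_cons]
      push_cast
      omega

lemma enumerate_shift {α : Type} (xs : List α) (s c : Int) :
    PySem.List.enumerate xs (s + c) =
      (PySem.List.enumerate xs s).map (fun p => (p.1 + c, p.2)) := by
  induction xs generalizing s with
  | nil => simp [PySem.List.enumerate_nil]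
  | cons x xs ih =>
    rw [PySem.List.enumerate_cons, PySem.List.enumerate_cons]
    have h : s + c + 1 = (s + 1) + c := by ring
    rw [List.map_cons, h, ih]

-- A's chunked count, written as a sum over the chunk indices
lemma helper1 (student answer : List Int) (hk : 0 < student.length) :
    calculateA answer student =
      ((List.range ((answer.length + student.length - 1) / student.length)).map
        (chunkCnt student answer)).sum := by
  set k := student.length with hkdef
  unfold calculateA
  simp only [PySem.List.foldl_count_if, PySem.List.foldl_add, zero_add]
  rw [PySem.List.pyRange_of_pos _ _ (by exact_mod_cast hk)]
  by_cases hn : 0 < answer.length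
  · rw [if_pos (by exact_mod_cast hn)]
    have hq : ((↑answer.length - 0 + ↑k - 1) / (↑k : Int)).toNat
        = (answer.length + k - 1) / k := by
      have h1 : ((↑answer.length - 0 + ↑k - 1 : Int)) = ↑(answer.length + k - 1) := by
        omega
      rw [h1, ← Int.natCast_div, Int.toNat_natCast]
    rw [hq, List.map_map]
    congr 1
    apply List.map_congr_left
    intro j hj
    simp only [Function.comp]
    have h0 : (0 + (↑k : Int) * ↑j) = ↑(k * j) := by push_cast; ring
    rw [h0]
    have h1 : ((↑(k * j) : Int) + ↑student.length) = ↑(k * j + k) := by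
      push_cast; simp [hkdef]
    rw [h1, PySem.List.slice_natCast]
    have h2 : k * j + k - k * j = k := by omega
    rw [h2]
    unfold chunkCnt predA
    rfl
  · rw [if_neg (by exact_mod_cast hn)]
    have hz : answer.length = 0 := by omega
    rw [hz]
    have h0 : (0 + k - 1) / k = 0 := Nat.div_eq_of_lt (by omega)
    rw [h0]
    simp

-- first-chunk congruence: below index len(student), the modular predicate is the plain one
lemma countP_mod_eq_predA (student xs : List Int) (hlen : xs.length ≤ student.length) :
    (PySem.List.enumerate xs).countP (modPred student) =
      (PySem.List.enumerate xs).countP (predA student) := by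
  apply List.countP_congr
  intro p hp
  have hb := mem_enumerate_bounds xs 0 p hp
  unfold modPred predA
  have hmod : PySem.Int.mod p.1 (student.length : Int) = p.1 := by
    rw [PySem.Int.mod_eq_emod_of_pos (by omega : (0:Int) < student.length)]
    exact Int.emod_eq_of_lt hb.1 (by omega)
  rw [hmod]

lemma modPred_shift (student : List Int) (hk : 0 < student.length) (p : Int × Int) :
    modPred student (p.1 + (student.length : Int), p.2) = modPred student p := by
  unfold modPred
  rw [PySem.Int.mod_eq_emod_of_pos (by exact_mod_cast hk),
    PySem.Int.mod_eq_emod_of_pos (by exact_mod_cast hk)]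
  have h1 : p.1 + (student.length : Int) = p.1 + (student.length : Int) * 1 := by ring
  rw [h1, Int.add_mul_emod_self_left]

-- B's flat modular count, peeled one chunk at a time
lemma helper2 (student answer : List Int) (hk : 0 < student.length) :
    modScore student answer =
      chunkCnt student answer 0 + modScore student (List.drop student.length answer) := by
  rcases le_or_gt answer.length student.length with hle | hgt
  · rw [List.drop_eq_nil_of_le (by omega)]
    unfold modScore chunkCnt
    simp only [Nat.mul_zero, List.drop_zero, PySem.List.enumerate_nil, List.countP_nil,
      Nat.cast_zero, add_zero]
    rw [List.take_of_length_le (by omega : answer.length ≤ student.length),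
      countP_mod_eq_predA student answer (by omega)]
  · conv_lhs => rw [← List.take_append_drop student.length answer]
    unfold modScore chunkCnt
    rw [PySem.List.enumerate_append, List.countP_append]
    have hlen : (List.take student.length answer).length = student.length :=
      List.length_take_of_le (by omega)
    push_cast
    congr 1
    · rw [Nat.mul_zero, List.drop_zero,
        countP_mod_eq_predA student (List.take student.length answer) (by rw [hlen])]
    · rw [hlen]
      rw [show ((student.length : Int)) = 0 + (student.length : Int) from (zero_add _).symm,
        enumerate_shift, List.countP_map]
      norm_cast
      apply List.countP_congr
      intro p _
      have hc : ((0 + student.length : Nat) : Int) = (student.length : Int) := by simp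
      rw [hc, Function.comp_apply, modPred_shift student hk p]

lemma chunkCnt_succ (student answer : List Int) (j : Nat) :
    chunkCnt student answer (j + 1) = chunkCnt student (List.drop student.length answer) j := by
  unfold chunkCnt
  rw [List.drop_drop]
  have h : student.length * (j + 1) = student.length + student.length * j := by ring
  rw [h]

-- key lemma: A's chunked count equals B's flat modular count
lemma calc_eq_modScore (student : List Int) (hk : 0 < student.length) :
    ∀ answer : List Int, calculateA answer student = modScore student answer := by
  have main : ∀ n (answer : List Int), answer.length ≤ n →
      calculateA answer student = modScore student answer := by
    intro n
    induction n with
    | zero =>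
      intro answer h
      have hnil : answer = [] := List.eq_nil_of_length_eq_zero (by omega)
      subst hnil
      rw [helper1 student [] hk]
      unfold modScore
      simp [Nat.div_eq_of_lt (show student.length - 1 < student.length by omega),
        PySem.List.enumerate_nil]
    | succ n ih =>
      intro answer h
      by_cases hnil : answer = []
      · subst hnil
        rw [helper1 student [] hk]
        unfold modScore
        simp [Nat.div_eq_of_lt (show student.length - 1 < student.length by omega),
          PySem.List.enumerate_nil]
      · have hn1 : 1 ≤ answer.length := List.length_pos_iff.mpr hnil
        rw [helper1 student answer hk, helper2 student answer hk]
        have hQ : (answer.length + student.length - 1) / student.length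
            = (answer.length - 1) / student.length + 1 := by
          have he : answer.length + student.length - 1
              = (answer.length - 1) + student.length := by omega
          rw [he, Nat.add_div_right _ hk]
        rw [hQ, List.range_succ_eq_map, List.map_cons, List.sum_cons]
        congr 1
        have hmap : List.map (chunkCnt student answer) (List.map Nat.succ
            (List.range ((answer.length - 1) / student.length)))
            = List.map (chunkCnt student (List.drop student.length answer))
              (List.range ((answer.length - 1) / student.length)) := by
          rw [List.map_map]
          apply List.map_congr_left
          intro j _
          simp only [Function.comp]
          exact chunkCnt_succ student answer j
        rw [hmap]
        have hQ' : (answer.length - 1) / student.length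
            = ((List.drop student.length answer).length + student.length - 1)
                / student.length := by
          rw [List.length_drop]
          rcases le_or_gt answer.length student.length with hle | hgt
          · have h1 : answer.length - student.length = 0 := by omega
            rw [h1, Nat.div_eq_of_lt (by omega), Nat.div_eq_of_lt (by omega)]
          · congr 1
            omega
        rw [hQ', ← helper1 student (List.drop student.length answer) hk]
        exact ih (List.drop student.length answer) (by rw [List.length_drop]; omega)
  intro answer
  exact main answer.length answer le_rfl

-- the maximum of the three collected scores, as A's max? computes it
lemma max?_three (c1 c2 c3 : Int) :
    PySem.List.max? [c1, c2, c3] id = some (max c1 (max c2 c3)) := by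
  rcases lt_or_ge c1 c2 with h | h
  · rcases lt_or_ge c2 c3 with h' | h'
    · simp [PySem.List.max?, h, h', max_eq_right h'.le, max_eq_right (h.trans h').le]
    · simp [PySem.List.max?, h, not_lt.mpr h', max_eq_left h', max_eq_right h.le]
  · rcases lt_or_ge c1 c3 with h' | h'
    · simp [PySem.List.max?, not_lt.mpr h, h', max_eq_right (h.trans h'.le),
        max_eq_right h'.le]
    · simp [PySem.List.max?, not_lt.mpr h, not_lt.mpr h', max_eq_left (max_le h h')]

-- the selection step: A's max?/append/sort on [c1,c2,c3] equals B's max/filterMap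
lemma select_eq (c1 c2 c3 : Int) :
    (match PySem.List.max? [c1, c2, c3] id with
     | none => ([] : List Int)
     | some maxValue =>
       PySem.List.sorted ((PySem.List.enumerate [c1, c2, c3]).foldl
         (fun acc p => if p.2 == maxValue then acc ++ [p.1 + 1] else acc) []) id) =
    (PySem.List.enumerate [c1, c2, c3] 1).filterMap
      (fun p => if p.2 == max c1 (max c2 c3) then some p.1 else none) := by
  rw [max?_three]
  set M := max c1 (max c2 c3) with hM
  simp only [PySem.List.enumerate_cons, PySem.List.enumerate_nil, List.foldl, List.filterMap]
  norm_num
  by_cases e1 : c1 = M <;> by_cases e2 : c2 = M <;> by_cases e3 : c3 = M <;>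
    simp [e1, e2, e3] <;> decide

-- ===== VERDICT (by name: the statement is the Claim_ definition above) =====
theorem solution_spec : Claim_equal_solution := by
  unfold Claim_equal_solution
  intro answer _
  unfold Spec_solution solution solution_alt
  dsimp only
  have hsplit : List.foldl
      (fun (s : Int × Int × Int) (p : Int × Int) =>
        (if PySem.List.pyGetD [1, 2, 3, 4, 5] (PySem.Int.mod p.1 5) 0 == p.2 then s.1 + 1 else s.1,
         if PySem.List.pyGetD [2, 1, 2, 3, 2, 4, 2, 5] (PySem.Int.mod p.1 8) 0 == p.2 then s.2.1 + 1 else s.2.1,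
         if PySem.List.pyGetD [3, 3, 1, 1, 2, 2, 4, 4, 5, 5] (PySem.Int.mod p.1 10) 0 == p.2 then s.2.2 + 1 else s.2.2))
      ((0 : Int), (0 : Int), (0 : Int)) (PySem.List.enumerate answer)
      = (calculateA answer [1, 2, 3, 4, 5],
         calculateA answer [2, 1, 2, 3, 2, 4, 2, 5],
         calculateA answer [3, 3, 1, 1, 2, 2, 4, 4, 5, 5]) := by
    rw [PySem.List.foldl_prod_mk
        (f := fun (a : Int) (p : Int × Int) =>
          if PySem.List.pyGetD [1, 2, 3, 4, 5] (PySem.Int.mod p.1 5) 0 == p.2 then a + 1 else a)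
        (g := fun (t : Int × Int) (p : Int × Int) =>
          (if PySem.List.pyGetD [2, 1, 2, 3, 2, 4, 2, 5] (PySem.Int.mod p.1 8) 0 == p.2 then t.1 + 1 else t.1,
           if PySem.List.pyGetD [3, 3, 1, 1, 2, 2, 4, 4, 5, 5] (PySem.Int.mod p.1 10) 0 == p.2 then t.2 + 1 else t.2)),
      PySem.List.foldl_prod_mk
        (f := fun (a : Int) (p : Int × Int) =>
          if PySem.List.pyGetD [2, 1, 2, 3, 2, 4, 2, 5] (PySem.Int.mod p.1 8) 0 == p.2 then a + 1 else a)
        (g := fun (a : Int) (p : Int × Int) =>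
          if PySem.List.pyGetD [3, 3, 1, 1, 2, 2, 4, 4, 5, 5] (PySem.Int.mod p.1 10) 0 == p.2 then a + 1 else a)]
    simp only [PySem.List.foldl_count_if, zero_add]
    refine congrArg₂ _ ?_ (congrArg₂ _ ?_ ?_)
    · rw [calc_eq_modScore [1, 2, 3, 4, 5] (by decide) answer]; rfl
    · rw [calc_eq_modScore [2, 1, 2, 3, 2, 4, 2, 5] (by decide) answer]; rfl
    · rw [calc_eq_modScore [3, 3, 1, 1, 2, 2, 4, 4, 5, 5] (by decide) answer]; rfl
  rw [hsplit]
  exact select_eq _ _ _
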